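-- pv_equiv track=rewrite | github.com/manoskary/MusGConv | musgconv/utils/chord_representations.py | chord_to_intervalVector
-- ===== SOURCE A (Python) =====
-- from itertools import combinations
--
-- def chord_to_intervalVector(midi_pitches, return_pc_class=False):
--     '''Given a chord it calculates the Interval Vector.
--
--
--     Parameters
--     ----------
--     midi_pitches : list(int)
--         The midi_pitches, is a list of integers < 128.
--
--     Returns
--     -------
--     intervalVector : list(int)
--         The interval Vector is a list of six integer values.
--     '''
--     intervalVector = [0, 0, 0, 0, 0, 0]
--     PC = set([mp%12 for mp in midi_pitches])
--     for p1, p2 in combinations(PC, 2):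
--         interval = int(abs(p1 - p2))
--         if interval <= 6:
--             index = interval
--         else:
--             index = 12 - interval
--         if index != 0:
--             index = index-1
--             intervalVector[index] += 1
--     if return_pc_class:
--         return intervalVector, list(PC)
--     else:
--         return intervalVector
-- ===== SOURCE B (Python) =====
-- def chord_to_intervalVector(midi_pitches, return_pc_class=False):
--     """Interval vector via complement lookup: for each interval class ic,
--     count present pitch classes whose ic-transposition is also present."""
--     PC = set([mp % 12 for mp in midi_pitches])
--     intervalVector = []
--     for ic in range(1, 7):
--         c = 0
--         for p in PC:
--             if (p + ic) % 12 in PC: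
--                 c += 1
--         intervalVector.append(c if ic < 6 else c // 2)
--     if return_pc_class:
--         return intervalVector, list(PC)
--     else:
--         return intervalVector
-- ===== Notes on version B (the rewrite author's own statement) =====
-- stated objective: alternative
-- what changed: Replaces the enumeration of all C(n,2) pitch-class pairs with a single complement-lookup pass: for each interval class ic in 1..6 it counts present pitch classes p whose transposition (p+ic)%12 is also present (halving the ic=6 bin, which is double-counted).
import Mathlib
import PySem

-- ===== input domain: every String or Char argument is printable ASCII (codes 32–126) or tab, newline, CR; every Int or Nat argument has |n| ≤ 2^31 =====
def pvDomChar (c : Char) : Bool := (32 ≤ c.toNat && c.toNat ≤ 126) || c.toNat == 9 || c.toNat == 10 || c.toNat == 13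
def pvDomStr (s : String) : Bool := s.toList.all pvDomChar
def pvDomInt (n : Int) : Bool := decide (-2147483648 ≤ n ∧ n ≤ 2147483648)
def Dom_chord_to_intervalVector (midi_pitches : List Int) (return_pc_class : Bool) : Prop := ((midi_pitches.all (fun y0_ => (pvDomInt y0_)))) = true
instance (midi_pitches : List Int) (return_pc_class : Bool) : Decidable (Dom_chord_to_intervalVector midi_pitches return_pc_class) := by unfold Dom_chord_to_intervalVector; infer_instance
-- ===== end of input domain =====

-- B replaces A's pairwise combinations enumeration by a complement-lookup pass per interval class
-- (halving the double-counted ic=6 bin); equivalence is about the return value, on return_pc_class = false.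

-- ===== PORT A =====
-- combinations(PC, 2): all pairs (PC[i], PC[j]) with i < j, in order
def pvCombos2 : List Int → List (Int × Int)
  | [] => []
  | x :: xs => xs.map (fun y => (x, y)) ++ pvCombos2 xs

-- 'interval = int(abs(p1 - p2)); index = interval if interval <= 6 else 12 - interval'
def pvIdxA (pr : Int × Int) : Int :=
  if |pr.1 - pr.2| ≤ 6 then |pr.1 - pr.2| else 12 - |pr.1 - pr.2|

-- one iteration of A's loop body ('if index != 0: intervalVector[index-1] += 1')
def pvStepA (iv : List Int) (pr : Int × Int) : List Int :=
  if pvIdxA pr ≠ 0 then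
    PySem.List.pySetD iv (pvIdxA pr - 1) (PySem.List.pyGetD iv (pvIdxA pr - 1) 0 + 1)
  else iv

def chord_to_intervalVector (midi_pitches : List Int) (return_pc_class : Bool) : List Int :=
  let PC : PySem.Set Int := PySem.Set.ofList (midi_pitches.map (fun mp => PySem.Int.mod mp 12))
  (pvCombos2 PC).foldl pvStepA [0, 0, 0, 0, 0, 0]
  -- with return_pc_class = True the Python returns a (list, list) tuple, not a List Int:
  -- those inputs are excluded by Pre_; the interval vector is returned either way.

-- ===== PORT B =====
-- 'c = 0; for p in PC: if (p + ic) % 12 in PC: c += 1'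
def pvCountIC (pc : List Int) (ic : Int) : Int :=
  pc.foldl (fun c p => if PySem.Int.mod (p + ic) 12 ∈ pc then c + 1 else c) 0

def chord_to_intervalVector_alt (midi_pitches : List Int) (return_pc_class : Bool) : List Int :=
  let PC : PySem.Set Int := PySem.Set.ofList (midi_pitches.map (fun mp => PySem.Int.mod mp 12))
  (PySem.List.pyRange 1 7 1).foldl
    (fun acc ic =>
      acc ++ [if ic < 6 then pvCountIC PC ic else PySem.Int.floordiv (pvCountIC PC ic) 2]) []

-- ===== PRECONDITION & SPEC =====
-- Pre_ excludes return_pc_class = True, on which A returns an (intervalVector, list(PC)) TUPLE —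
-- not a value of the declared List Int return type (and list(PC) depends on set iteration order).
def Pre_chord_to_intervalVector (midi_pitches : List Int) (return_pc_class : Bool) : Prop :=
  return_pc_class = false
instance (midi_pitches : List Int) (return_pc_class : Bool) : Decidable (Pre_chord_to_intervalVector midi_pitches return_pc_class) := by unfold Pre_chord_to_intervalVector; infer_instance

def pvWitness_chord_to_intervalVector : List Int × Bool := ([60, 64, 67], false)

def Spec_chord_to_intervalVector (midi_pitches : List Int) (return_pc_class : Bool) (out : List Int) : Prop := out = chord_to_intervalVector_alt midi_pitches return_pc_class
instance (midi_pitches : List Int) (return_pc_class : Bool) (out : List Int) : Decidable (Spec_chord_to_intervalVector midi_pitches return_pc_class out) := by unfold Spec_chord_to_intervalVector; infer_instance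

-- ===== CLAIM (what is proved, stated in full; the proofs are below) =====
def Claim_equal_chord_to_intervalVector : Prop := ∀ (midi_pitches : List Int) (return_pc_class : Bool), Dom_chord_to_intervalVector midi_pitches return_pc_class → Pre_chord_to_intervalVector midi_pitches return_pc_class → Spec_chord_to_intervalVector midi_pitches return_pc_class (chord_to_intervalVector midi_pitches return_pc_class)

-- ===== LEMMAS AND PROOFS =====

theorem pvCountP_congr {α : Type} (l : List α) (p q : α → Bool) (h : ∀ a ∈ l, p a = q a) :
    l.countP p = l.countP q := by
  rw [List.countP_eq_length_filter, List.countP_eq_length_filter, List.filter_congr h]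

-- membership in the combinations list
theorem pvMem_combos2 {pr : Int × Int} {l : List Int} (h : pr ∈ pvCombos2 l) :
    pr.1 ∈ l ∧ pr.2 ∈ l := by
  induction l with
  | nil => simp [pvCombos2] at h
  | cons x xs ih =>
    simp only [pvCombos2, List.mem_append, List.mem_map] at h
    rcases h with ⟨y, hy, rfl⟩ | h
    · exact ⟨List.mem_cons_self, List.mem_cons_of_mem _ hy⟩
    · exact ⟨List.mem_cons_of_mem _ (ih h).1, List.mem_cons_of_mem _ (ih h).2⟩

-- fold characterization of A's loop: each slot accumulates the count of pairs with that index
theorem pvFoldA_char (ps : List (Int × Int))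
    (h : ∀ pr ∈ ps, 0 ≤ pvIdxA pr ∧ pvIdxA pr ≤ 6) :
    ∀ a b c d e f : Int,
      ps.foldl pvStepA [a, b, c, d, e, f] =
        [a + (ps.countP (fun pr => pvIdxA pr == 1) : Int),
         b + (ps.countP (fun pr => pvIdxA pr == 2) : Int),
         c + (ps.countP (fun pr => pvIdxA pr == 3) : Int),
         d + (ps.countP (fun pr => pvIdxA pr == 4) : Int),
         e + (ps.countP (fun pr => pvIdxA pr == 5) : Int),
         f + (ps.countP (fun pr => pvIdxA pr == 6) : Int)] := by
  induction ps with
  | nil => simp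
  | cons pr ps ih =>
    intro a b c d e f
    have hb := h pr List.mem_cons_self
    have ht : ∀ q ∈ ps, 0 ≤ pvIdxA q ∧ pvIdxA q ≤ 6 := fun q hq => h q (List.mem_cons_of_mem _ hq)
    have hcase : pvIdxA pr = 0 ∨ pvIdxA pr = 1 ∨ pvIdxA pr = 2 ∨ pvIdxA pr = 3 ∨
        pvIdxA pr = 4 ∨ pvIdxA pr = 5 ∨ pvIdxA pr = 6 := by omega
    rw [List.foldl_cons]
    rcases hcase with hI | hI | hI | hI | hI | hI | hI
    · have hstep : pvStepA [a, b, c, d, e, f] pr = [a, b, c, d, e, f] := by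
        simp [pvStepA, hI]
      rw [hstep, ih ht]; simp [List.countP_cons, hI]
    · have hstep : pvStepA [a, b, c, d, e, f] pr = [a + 1, b, c, d, e, f] := by
        simp [pvStepA, hI, PySem.List.pySetD_of_nonneg, PySem.List.pyGetD]
      rw [hstep, ih ht]; simp [List.countP_cons, hI]; omega
    · have hstep : pvStepA [a, b, c, d, e, f] pr = [a, b + 1, c, d, e, f] := by
        simp [pvStepA, hI, PySem.List.pySetD_of_nonneg, PySem.List.pyGetD]
      rw [hstep, ih ht]; simp [List.countP_cons, hI]; omega
    · have hstep : pvStepA [a, b, c, d, e, f] pr = [a, b, c + 1, d, e, f] := by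
        simp [pvStepA, hI, PySem.List.pySetD_of_nonneg, PySem.List.pyGetD]
      rw [hstep, ih ht]; simp [List.countP_cons, hI]; omega
    · have hstep : pvStepA [a, b, c, d, e, f] pr = [a, b, c, d + 1, e, f] := by
        simp [pvStepA, hI, PySem.List.pySetD_of_nonneg, PySem.List.pyGetD]
      rw [hstep, ih ht]; simp [List.countP_cons, hI]; omega
    · have hstep : pvStepA [a, b, c, d, e, f] pr = [a, b, c, d, e + 1, f] := by
        simp [pvStepA, hI, PySem.List.pySetD_of_nonneg, PySem.List.pyGetD]
      rw [hstep, ih ht]; simp [List.countP_cons, hI]; omega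
    · have hstep : pvStepA [a, b, c, d, e, f] pr = [a, b, c, d, e, f + 1] := by
        simp [pvStepA, hI, PySem.List.pySetD_of_nonneg, PySem.List.pyGetD]
      rw [hstep, ih ht]; simp [List.countP_cons, hI]; omega

-- countP over a product, row by row
theorem pvRows (p : Int × Int → Bool) (xs ys : List Int) :
    (xs ×ˢ ys).countP p = (xs.map (fun x => ys.countP (fun y => p (x, y)))).sum := by
  induction xs with
  | nil => simp [List.product_nil]
  | cons x xs ih => simp [List.product_cons, List.countP_append, List.countP_map, ih]; rfl

-- countP over the symmetric product is twice the countP over combinations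
theorem pvSym (p : Int × Int → Bool) (hsym : ∀ x y, p (x, y) = p (y, x))
    (hdiag : ∀ x, p (x, x) = false) :
    ∀ l : List Int, (l ×ˢ l).countP p = 2 * (pvCombos2 l).countP p := by
  intro l
  induction l with
  | nil => simp [pvCombos2, List.product_nil]
  | cons x xs ih =>
    have hhelper : ∀ (zs ys : List Int),
        (zs ×ˢ (x :: ys)).countP p = zs.countP (fun y => p (y, x)) + (zs ×ˢ ys).countP p := by
      intro zs ys
      induction zs with
      | nil => simp [List.product_nil]
      | cons z zs ihz =>
        simp [List.product_cons, List.countP_append, List.countP_cons, List.countP_map, ihz]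
        omega
    have hcomp : ∀ ys : List Int, (ys.map (fun y => (x, y))).countP p = ys.countP (fun y => p (x, y)) := by
      intro ys; rw [List.countP_map]; rfl
    rw [List.product_cons, List.countP_append, hcomp, hhelper xs xs, List.countP_cons]
    rw [pvCountP_congr xs (fun y => p (y, x)) (fun y => p (x, y)) (fun a _ => hsym a x)]
    simp only [pvCombos2, List.countP_append, hcomp]
    rw [ih]
    simp [hdiag x]
    omega

theorem pvCount_nodup (l : List Int) (h : l.Nodup) (t : Int) :
    l.count t = if t ∈ l then 1 else 0 := by
  rcases Decidable.em (t ∈ l) with hm | hm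
  · simp only [hm, if_true]; exact List.count_eq_one_of_mem h hm
  · simp only [hm, if_false]; exact List.count_eq_zero.mpr hm

theorem pvOrCount (l : List Int) (t1 t2 : Int) (h : t1 ≠ t2) :
    l.countP (fun q => q == t1 || q == t2) = l.count t1 + l.count t2 := by
  induction l with
  | nil => simp
  | cons a l ih =>
    simp only [List.countP_cons, List.count_cons, ih]
    by_cases h1 : a = t1 <;> by_cases h2 : a = t2 <;> simp [h1, h2, h, Ne.symm h] <;> omega

-- sum of an indicator map is a countP
theorem pvIndicator (l : List Int) (P : Int → Prop) [DecidablePred P] :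
    (l.map (fun x => if P x then 1 else 0)).sum = l.countP (fun x => decide (P x)) := by
  induction l with
  | nil => simp
  | cons a l ih => by_cases hp : P a <;> simp [List.countP_cons, hp, ih] <;> omega

theorem pvSumAdd (l : List Int) (f g : Int → Nat) :
    (l.map (fun x => f x + g x)).sum = (l.map f).sum + (l.map g).sum := by
  induction l with
  | nil => simp
  | cons a l ih => simp [ih]; omega

theorem pvIdxA_self (x : Int) : pvIdxA (x, x) = 0 := by simp [pvIdxA]

theorem pvIdxA_symm (x y : Int) : pvIdxA (x, y) = pvIdxA (y, x) := by
  simp [pvIdxA, abs_sub_comm]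

theorem pvIdx_iff (p q k : Int) (hp0 : 0 ≤ p) (hp1 : p < 12) (hq0 : 0 ≤ q) (hq1 : q < 12)
    (hk0 : 1 ≤ k) (hk1 : k ≤ 5) :
    (pvIdxA (p, q) == k) = ((q == PySem.Int.mod (p + k) 12) || (q == PySem.Int.mod (p - k) 12)) := by
  rw [Bool.eq_iff_iff]
  simp only [beq_iff_eq, Bool.or_eq_true, pvIdxA]
  rw [PySem.Int.mod_eq_emod_of_pos (by norm_num), PySem.Int.mod_eq_emod_of_pos (by norm_num)]
  rcases abs_cases (p - q) with ⟨he, _⟩ | ⟨he, _⟩ <;> rw [he] <;> split_ifs <;> omega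

theorem pvIdx6_iff (p q : Int) (hp0 : 0 ≤ p) (hp1 : p < 12) (hq0 : 0 ≤ q) (hq1 : q < 12) :
    (pvIdxA (p, q) == (6 : Int)) = (q == PySem.Int.mod (p + 6) 12) := by
  rw [Bool.eq_iff_iff]
  simp only [beq_iff_eq, pvIdxA]
  rw [PySem.Int.mod_eq_emod_of_pos (by norm_num)]
  rcases abs_cases (p - q) with ⟨he, _⟩ | ⟨he, _⟩ <;> rw [he] <;> split_ifs <;> omega

theorem pvT1_ne_T2 (p k : Int) (hp0 : 0 ≤ p) (hp1 : p < 12) (hk0 : 1 ≤ k) (hk1 : k ≤ 5) :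
    PySem.Int.mod (p + k) 12 ≠ PySem.Int.mod (p - k) 12 := by
  rw [PySem.Int.mod_eq_emod_of_pos (by norm_num), PySem.Int.mod_eq_emod_of_pos (by norm_num)]
  omega

-- the shift bijection: counting backward targets equals counting forward targets
theorem pvShift (l : List Int) (k : Int) (hnd : l.Nodup) (hr : ∀ x ∈ l, 0 ≤ x ∧ x < 12) :
    l.countP (fun p => decide (PySem.Int.mod (p - k) 12 ∈ l)) =
    l.countP (fun p => decide (PySem.Int.mod (p + k) 12 ∈ l)) := by
  have hmod : ∀ a : Int, PySem.Int.mod a 12 = a % 12 :=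
    fun a => PySem.Int.mod_eq_emod_of_pos (by norm_num)
  rw [List.countP_eq_length_filter, List.countP_eq_length_filter]
  have hperm : ((l.filter (fun p => decide (PySem.Int.mod (p - k) 12 ∈ l))).map
      (fun p => PySem.Int.mod (p - k) 12)).Perm
      (l.filter (fun p => decide (PySem.Int.mod (p + k) 12 ∈ l))) := by
    apply (List.perm_ext_iff_of_nodup _ (List.Nodup.filter _ hnd)).mpr
    · intro x
      simp only [List.mem_map, List.mem_filter, decide_eq_true_eq]
      constructor
      · rintro ⟨p, ⟨hpl, hpm⟩, rfl⟩
        refine ⟨hpm, ?_⟩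
        have h1 := (hr p hpl).1; have h2 := (hr p hpl).2
        rw [hmod, hmod]
        have hpp : ((p - k) % 12 + k) % 12 = p := by omega
        rw [hpp]; exact hpl
      · rintro ⟨hxl, hxm⟩
        refine ⟨PySem.Int.mod (x + k) 12, ⟨hxm, ?_⟩, ?_⟩
        · rw [hmod, hmod]
          have h1 := (hr x hxl).1; have h2 := (hr x hxl).2
          have : ((x + k) % 12 - k) % 12 = x := by omega
          rw [this]; exact hxl
        · rw [hmod, hmod]
          have h1 := (hr x hxl).1; have h2 := (hr x hxl).2
          omega
    · apply (List.nodup_map_iff_inj_on (List.Nodup.filter _ hnd)).mpr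
      intro x hx y hy hxy
      rw [List.mem_filter] at hx hy
      have hx1 := (hr x hx.1).1; have hx2 := (hr x hx.1).2
      have hy1 := (hr y hy.1).1; have hy2 := (hr y hy.1).2
      rw [hmod, hmod] at hxy
      omega
  calc (l.filter (fun p => decide (PySem.Int.mod (p - k) 12 ∈ l))).length
      = ((l.filter (fun p => decide (PySem.Int.mod (p - k) 12 ∈ l))).map
          (fun p => PySem.Int.mod (p - k) 12)).length := by rw [List.length_map]
    _ = (l.filter (fun p => decide (PySem.Int.mod (p + k) 12 ∈ l))).length := hperm.length_eq

-- ordered count = forward count + backward count (k = 1..5)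
theorem pvOrdered (l : List Int) (k : Int) (hnd : l.Nodup) (hr : ∀ x ∈ l, 0 ≤ x ∧ x < 12)
    (hk0 : 1 ≤ k) (hk1 : k ≤ 5) :
    (l ×ˢ l).countP (fun pr => pvIdxA pr == k) =
      l.countP (fun p => decide (PySem.Int.mod (p + k) 12 ∈ l)) +
      l.countP (fun p => decide (PySem.Int.mod (p - k) 12 ∈ l)) := by
  rw [pvRows]
  have hrow : ∀ x ∈ l, l.countP (fun y => pvIdxA (x, y) == k) =
      (if PySem.Int.mod (x + k) 12 ∈ l then 1 else 0) +
      (if PySem.Int.mod (x - k) 12 ∈ l then 1 else 0) := by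
    intro x hx
    rw [pvCountP_congr l _ (fun q => q == PySem.Int.mod (x + k) 12 || q == PySem.Int.mod (x - k) 12)
      (fun q hq => pvIdx_iff x q k (hr x hx).1 (hr x hx).2 (hr q hq).1 (hr q hq).2 hk0 hk1)]
    rw [pvOrCount l _ _ (pvT1_ne_T2 x k (hr x hx).1 (hr x hx).2 hk0 hk1)]
    rw [pvCount_nodup l hnd, pvCount_nodup l hnd]
  rw [List.map_congr_left hrow]
  rw [pvSumAdd l (fun x => if PySem.Int.mod (x + k) 12 ∈ l then 1 else 0)
    (fun x => if PySem.Int.mod (x - k) 12 ∈ l then 1 else 0)]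
  rw [pvIndicator, pvIndicator]

theorem pvOrdered6 (l : List Int) (hnd : l.Nodup) (hr : ∀ x ∈ l, 0 ≤ x ∧ x < 12) :
    (l ×ˢ l).countP (fun pr => pvIdxA pr == (6 : Int)) =
      l.countP (fun p => decide (PySem.Int.mod (p + 6) 12 ∈ l)) := by
  rw [pvRows]
  have hrow : ∀ x ∈ l, l.countP (fun y => pvIdxA (x, y) == (6 : Int)) =
      (if PySem.Int.mod (x + 6) 12 ∈ l then 1 else 0) := by
    intro x hx
    rw [pvCountP_congr l _ (fun q => q == PySem.Int.mod (x + 6) 12)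
      (fun q hq => pvIdx6_iff x q (hr x hx).1 (hr x hx).2 (hr q hq).1 (hr q hq).2)]
    rw [show (fun q => q == PySem.Int.mod (x + 6) 12) = (· == PySem.Int.mod (x + 6) 12) from rfl]
    rw [← List.count]
    rw [pvCount_nodup l hnd]
  rw [List.map_congr_left hrow, pvIndicator]

-- the headline counting identities
theorem pvMainK (l : List Int) (k : Int) (hnd : l.Nodup) (hr : ∀ x ∈ l, 0 ≤ x ∧ x < 12)
    (hk0 : 1 ≤ k) (hk1 : k ≤ 5) :
    (pvCombos2 l).countP (fun pr => pvIdxA pr == k) =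
      l.countP (fun p => decide (PySem.Int.mod (p + k) 12 ∈ l)) := by
  have hsym := pvSym (fun pr => pvIdxA pr == k)
    (fun x y => by simp only [pvIdxA_symm x y])
    (fun x => by simp only [pvIdxA_self]; simp; omega) l
  have ho := pvOrdered l k hnd hr hk0 hk1
  have hs := pvShift l k hnd hr
  omega

theorem pvMain6 (l : List Int) (hnd : l.Nodup) (hr : ∀ x ∈ l, 0 ≤ x ∧ x < 12) :
    2 * (pvCombos2 l).countP (fun pr => pvIdxA pr == (6 : Int)) =
      l.countP (fun p => decide (PySem.Int.mod (p + 6) 12 ∈ l)) := by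
  have hsym := pvSym (fun pr => pvIdxA pr == (6 : Int))
    (fun x y => by simp only [pvIdxA_symm x y])
    (fun x => by simp only [pvIdxA_self]; simp) l
  have ho := pvOrdered6 l hnd hr
  omega

-- B's inner loop is a countP
theorem pvCountIC_eq (pc : List Int) (ic : Int) :
    pvCountIC pc ic = (pc.countP (fun p => decide (PySem.Int.mod (p + ic) 12 ∈ pc)) : Int) := by
  unfold pvCountIC
  rw [PySem.List.foldl_ite_add_one]
  simp

-- ===== VERDICT (by name: the statement is the Claim_ definition above) =====
theorem chord_to_intervalVector_spec : Claim_equal_chord_to_intervalVector := by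
  intro midi_pitches return_pc_class _ _
  unfold Spec_chord_to_intervalVector chord_to_intervalVector chord_to_intervalVector_alt
  set pc : List Int := PySem.Set.ofList (midi_pitches.map (fun mp => PySem.Int.mod mp 12)) with hpc
  have hnd : pc.Nodup := PySem.Set.nodup_ofList _
  have hr : ∀ x ∈ pc, 0 ≤ x ∧ x < 12 := by
    intro x hx
    rw [hpc, PySem.Set.mem_ofList, List.mem_map] at hx
    obtain ⟨m, _, rfl⟩ := hx
    exact ⟨PySem.Int.mod_nonneg m (by norm_num), PySem.Int.mod_lt m (by norm_num)⟩
  have hbound : ∀ pr ∈ pvCombos2 pc, 0 ≤ pvIdxA pr ∧ pvIdxA pr ≤ 6 := by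
    intro pr hpr
    obtain ⟨h1, h2⟩ := pvMem_combos2 hpr
    have a1 := hr pr.1 h1; have a2 := hr pr.2 h2
    simp only [pvIdxA]
    rcases abs_cases (pr.1 - pr.2) with ⟨he, _⟩ | ⟨he, _⟩ <;> rw [he] <;> split_ifs <;> omega
  rw [pvFoldA_char (pvCombos2 pc) hbound 0 0 0 0 0 0]
  rw [show PySem.List.pyRange 1 7 1 = [1, 2, 3, 4, 5, 6] from by decide]
  simp only [List.foldl_cons, List.foldl_nil, List.nil_append, List.append_assoc,
    List.singleton_append]
  norm_num
  rw [pvCountIC_eq, pvCountIC_eq, pvCountIC_eq, pvCountIC_eq, pvCountIC_eq, pvCountIC_eq]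
  rw [← pvMainK pc 1 hnd hr (by norm_num) (by norm_num),
      ← pvMainK pc 2 hnd hr (by norm_num) (by norm_num),
      ← pvMainK pc 3 hnd hr (by norm_num) (by norm_num),
      ← pvMainK pc 4 hnd hr (by norm_num) (by norm_num),
      ← pvMainK pc 5 hnd hr (by norm_num) (by norm_num),
      ← pvMain6 pc hnd hr]
  refine ⟨rfl, rfl, rfl, rfl, rfl, ?_⟩
  omega
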